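-- pv_equiv track=rewrite | github.com/KleinTong/Daily-Coding-Problem-Solution | index_of_nearest_larger_integer/main.py | nearest_larger
-- ===== SOURCE A (Python) =====
-- def nearest_larger(arr, i):
--     length = len(arr)
--     record = [-1 for _ in range(length)]
--     for m in range(length):
--         for n in range(m, length):
--             if arr[m] > arr[n]:
--                 record[n] = m
--
--     for k in range(length - 1, -1, -1):
--         for j in range(k, -1, -1):
--             if arr[k] > arr[j]:
--                 if record[j] == -1:
--                     record[j] = k
--                 else:
--                     if abs(record[j] - j) > abs(k -j):
--                         record[j] = k
--
--     return record[i]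
-- ===== SOURCE B (Python) =====
-- def nearest_larger(arr, i):
--     n = len(arr)
--     idx = i if i >= 0 else i + n
--     v = arr[idx]
--     left = -1
--     for m in range(idx - 1, -1, -1):
--         if arr[m] > v:
--             left = m
--             break
--     right = -1
--     for r in range(idx + 1, n):
--         if arr[r] > v:
--             right = r
--             break
--     if left == -1:
--         return right
--     if right == -1:
--         return left
--     return right if right - idx < idx - left else left
-- ===== Notes on version B (the rewrite author's own statement) =====
-- stated objective: faster
-- what changed: A fills an n-cell nearest-larger table with two quadratic nested-loop passes and then reads one cell; B computes only the requested cell with two linear scans outward from index i (nearest strictly-larger to the left, then to the right) combined with A's left-preferring tie-break.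
import Mathlib
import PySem

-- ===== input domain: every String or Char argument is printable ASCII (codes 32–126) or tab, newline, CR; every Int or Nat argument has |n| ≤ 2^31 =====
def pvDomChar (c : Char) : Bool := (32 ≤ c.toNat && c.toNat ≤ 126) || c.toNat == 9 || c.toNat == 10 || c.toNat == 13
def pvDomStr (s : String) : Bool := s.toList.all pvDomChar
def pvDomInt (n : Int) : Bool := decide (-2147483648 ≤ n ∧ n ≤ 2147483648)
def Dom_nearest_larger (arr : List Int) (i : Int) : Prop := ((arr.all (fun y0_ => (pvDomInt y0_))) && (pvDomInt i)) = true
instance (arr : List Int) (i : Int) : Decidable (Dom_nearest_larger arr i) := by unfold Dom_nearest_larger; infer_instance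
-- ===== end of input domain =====

-- B replaces A's two quadratic table-building passes by two linear scans from index i
-- (nearest larger to the left, nearest larger to the right), combined with A's
-- left-preferring tie-break; the equivalence is about the return value only.

-- ===== PORT A =====
-- literal transliteration of A: build the full `record` table with two nested loops,
-- then return record[i]
def nearest_larger (arr : List Int) (i : Int) : Int :=
  let length : Int := arr.length
  let record : List Int := (PySem.List.pyRange 0 length 1).map (fun _ => (-1 : Int))
  let record := (PySem.List.pyRange 0 length 1).foldl (fun rec m =>
    (PySem.List.pyRange m length 1).foldl (fun rec n =>
      if PySem.List.pyGetD arr m 0 > PySem.List.pyGetD arr n 0 then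
        PySem.List.pySetD rec n m
      else rec) rec) record
  let record := (PySem.List.pyRange (length - 1) (-1) (-1)).foldl (fun rec k =>
    (PySem.List.pyRange k (-1) (-1)).foldl (fun rec j =>
      if PySem.List.pyGetD arr k 0 > PySem.List.pyGetD arr j 0 then
        if PySem.List.pyGetD rec j 0 = -1 then PySem.List.pySetD rec j k
        else if (PySem.List.pyGetD rec j 0 - j).natAbs > (k - j).natAbs then
          PySem.List.pySetD rec j k
        else rec
      else rec) rec) record
  PySem.List.pyGetD record i 0

-- ===== PORT B =====
-- B's left scan: `for m in range(idx-1, -1, -1): if arr[m] > v: left = m; break`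
def findLeftB (arr : List Int) (v : Int) : Nat → Int
  | 0 => -1
  | m + 1 => if arr.getD m 0 > v then (m : Int) else findLeftB arr v m

-- B's right scan: `for r in range(idx+1, n): if arr[r] > v: right = r; break`
def findRightB (arr : List Int) (v : Int) (r : Nat) : Int :=
  if r < arr.length then
    (if arr.getD r 0 > v then (r : Int) else findRightB arr v (r + 1))
  else -1
termination_by arr.length - r

def nearest_larger_alt (arr : List Int) (i : Int) : Int :=
  let n : Int := arr.length
  let idx : Int := if 0 ≤ i then i else i + n
  let v : Int := PySem.List.pyGetD arr idx 0
  let left : Int := findLeftB arr v idx.toNat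
  let right : Int := findRightB arr v (idx.toNat + 1)
  if left = -1 then right
  else if right = -1 then left
  else if right - idx < idx - left then right else left

-- ===== PRECONDITION & SPEC =====
-- Pre_ excludes exactly the inputs where A raises IndexError: an index i outside [-len(arr), len(arr))
def Pre_nearest_larger (arr : List Int) (i : Int) : Prop :=
  PySem.Raise.InRange arr.length i
instance (arr : List Int) (i : Int) : Decidable (Pre_nearest_larger arr i) := by
  unfold Pre_nearest_larger; infer_instance

def pvWitness_nearest_larger : List Int × Int := ([3, 1, 4, 1, 5], 1)

def Spec_nearest_larger (arr : List Int) (i : Int) (out : Int) : Prop := out = nearest_larger_alt arr i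
instance (arr : List Int) (i : Int) (out : Int) : Decidable (Spec_nearest_larger arr i out) := by unfold Spec_nearest_larger; infer_instance

-- ===== CLAIM (what is proved, stated in full; the proofs are below) =====
def Claim_equal_nearest_larger : Prop := ∀ (arr : List Int) (i : Int), Dom_nearest_larger arr i → Pre_nearest_larger arr i → Spec_nearest_larger arr i (nearest_larger arr i)

-- ===== LEMMAS AND PROOFS =====

-- abstract value of loop 1's cell j after outer iterations m = 0 .. M-1:
-- last m < M with m ≤ j and arr[m] > arr[j], else -1
def LL (arr : List Int) (j : Nat) : Nat → Int
  | 0 => -1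
  | M + 1 => if M ≤ j ∧ arr.getD M 0 > arr.getD j 0 then (M : Int) else LL arr j M

-- first k ≥ K with k > j and arr[k] > arr[j], else -1
def FR (arr : List Int) (j K : Nat) : Int :=
  if K < arr.length then
    (if j < K ∧ arr.getD K 0 > arr.getD j 0 then (K : Int) else FR arr j (K + 1))
  else -1
termination_by arr.length - K

-- the update rule of loop 2's body
def upd (c : Int) (j K : Nat) : Int :=
  if c = -1 then (K : Int)
  else if (c - j).natAbs > ((K : Int) - j).natAbs then (K : Int) else c

-- abstract value of loop 2's cell j after outer iterations k = n-1 .. K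
def G (arr : List Int) (j K : Nat) : Int :=
  if K < arr.length then
    (if j ≤ K ∧ arr.getD K 0 > arr.getD j 0 then upd (G arr j (K + 1)) j K
     else G arr j (K + 1))
  else LL arr j arr.length
termination_by arr.length - K

def combine (j : Nat) (l r : Int) : Int :=
  if l = -1 then r else if r = -1 then l
  else if r - j < j - l then r else l

theorem LL_cases (arr : List Int) (j M : Nat) :
    LL arr j M = -1 ∨ ∃ m : Nat, LL arr j M = m ∧ m < j ∧ m < M := by
  induction M with
  | zero => left; rfl
  | succ M ih =>
    unfold LL
    split
    · rename_i h
      right; refine ⟨M, rfl, ?_, Nat.lt_succ_self _⟩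
      rcases Nat.lt_or_ge M j with h'|h'
      · exact h'
      · have : M = j := Nat.le_antisymm h.1 h'
        subst this; exact absurd h.2 (lt_irrefl _)
    · rcases ih with h|⟨m, hm, h1, h2⟩
      · left; exact h
      · right; exact ⟨m, hm, h1, Nat.lt_succ_of_lt h2⟩

theorem FR_cases (arr : List Int) (j K : Nat) :
    FR arr j K = -1 ∨ ∃ r : Nat, FR arr j K = r ∧ j < r ∧ K ≤ r ∧ r < arr.length := by
  fun_induction FR arr j K with
  | case1 K h hc => right; exact ⟨K, rfl, hc.1, le_refl _, h⟩
  | case2 K h hc ih =>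
    rcases ih with h'|⟨r, hr, h1, h2, h3⟩
    · left; exact h'
    · right; exact ⟨r, hr, h1, Nat.le_of_succ_le h2, h3⟩
  | case3 K h => left; rfl

theorem LL_stable (arr : List Int) (j M : Nat) (h : j + 1 ≤ M) :
    LL arr j M = LL arr j (j + 1) := by
  induction M with
  | zero => omega
  | succ M ih =>
    by_cases hM : j + 1 ≤ M
    · rw [show LL arr j (M + 1) =
          (if M ≤ j ∧ arr.getD M 0 > arr.getD j 0 then (M : Int) else LL arr j M) from rfl,
        if_neg (fun hc => absurd hc.1 (by omega)), ih hM]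
    · have : j = M := by omega
      subst this
      rfl

theorem LL_eq_findLeftB (arr : List Int) (j M : Nat) (h : M ≤ j) :
    LL arr j M = findLeftB arr (arr.getD j 0) M := by
  induction M with
  | zero => rfl
  | succ M ih =>
    unfold LL findLeftB
    have hMj : M ≤ j := by omega
    by_cases hg : arr.getD M 0 > arr.getD j 0
    · rw [if_pos ⟨hMj, hg⟩, if_pos hg]
    · rw [if_neg (by tauto), if_neg hg, ih hMj]

theorem FR_eq_findRightB (arr : List Int) (j K : Nat) (h : j < K) :
    FR arr j K = findRightB arr (arr.getD j 0) K := by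
  fun_induction FR arr j K with
  | case1 K hK hc =>
    rw [findRightB, if_pos hK, if_pos hc.2]
  | case2 K hK hc ih =>
    rw [findRightB, if_pos hK]
    have hg : ¬ arr.getD K 0 > arr.getD j 0 := fun hg => hc ⟨h, hg⟩
    rw [if_neg hg, ih (by omega)]
  | case3 K hK => rw [findRightB, if_neg hK]

theorem FR_low (arr : List Int) (j K : Nat) (h : K ≤ j) :
    FR arr j K = FR arr j (j + 1) := by
  fun_induction FR arr j K with
  | case1 K _ hc => omega
  | case2 K hK hc ih =>
    rcases Nat.eq_or_lt_of_le h with h'|h'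
    · subst h'; rfl
    · exact ih (by omega)
  | case3 K hK => rw [FR, if_neg (by omega)]

theorem G_eq_combine (arr : List Int) (j K : Nat) :
    G arr j K = combine j (LL arr j arr.length) (FR arr j K) := by
  fun_induction G arr j K with
  | case1 K hK hc ih =>
    -- k = K fires: j ≤ K and arr[K] > arr[j]; in fact j < K
    have hjK : j < K := by
      rcases Nat.lt_or_ge j K with h|h
      · exact h
      · have : j = K := by omega
        subst this; exact absurd hc.2 (lt_irrefl _)
    have hFR : FR arr j K = (K : Int) := by
      rw [FR, if_pos hK, if_pos ⟨hjK, hc.2⟩]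
    rw [ih, hFR]
    clear ih
    rcases LL_cases arr j arr.length with hl|⟨m, hm, hm1, -⟩ <;>
      rcases FR_cases arr j (K+1) with hr|⟨r, hr, hr1, hr2, -⟩
    · rw [hl, hr]; simp only [combine, upd]; split_ifs <;> omega
    · rw [hl, hr]; simp only [combine, upd]; split_ifs <;> omega
    · rw [hm, hr]; simp only [combine, upd]; split_ifs <;> omega
    · rw [hm, hr]; simp only [combine, upd]; split_ifs <;> omega
  | case2 K hK hc ih =>
    rw [ih]
    have : FR arr j K = FR arr j (K + 1) := by
      rw [FR, if_pos hK, if_neg (fun h => hc ⟨Nat.le_of_lt h.1, h.2⟩)]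
    rw [this]
  | case3 K hK =>
    have : FR arr j K = -1 := by rw [FR, if_neg hK]
    rw [this]
    rcases LL_cases arr j arr.length with hl|⟨m, hm, -, -⟩
    · rw [hl]; simp only [combine]; split_ifs <;> omega
    · rw [hm]; simp only [combine]; split_ifs <;> omega

-- ---- loop 1 ----

theorem inner1_spec (arr : List Int) (m : Nat) :
    ∀ (t : Nat) (rec : List Int), m ≤ t → rec.length = arr.length →
    let res := (PySem.List.pyRange (t : Int) (arr.length : Int) 1).foldl (fun rec n =>
      if PySem.List.pyGetD arr (m : Int) 0 > PySem.List.pyGetD arr n 0 then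
        PySem.List.pySetD rec n (m : Int)
      else rec) rec
    res.length = arr.length ∧
    ∀ j : Nat, j < arr.length →
      res.getD j 0 = if t ≤ j ∧ arr.getD m 0 > arr.getD j 0 then (m : Int) else rec.getD j 0 := by
  intro t
  induction' hfuel : arr.length - t with fuel ih generalizing t
  · intro rec _ hlen
    have ht : (arr.length : Int) ≤ (t : Int) := by exact_mod_cast Nat.le_of_sub_eq_zero hfuel
    rw [PySem.List.pyRange_one_eq_nil ht]
    refine ⟨hlen, ?_⟩
    intro j hj
    rw [if_neg (by omega)]
    rfl
  · intro rec hmt hlen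
    have htlt : (t : Int) < (arr.length : Int) := by exact_mod_cast (by omega : t < arr.length)
    rw [PySem.List.pyRange_one_cons htlt, List.foldl_cons]
    have hcast : ((t : Int) + 1) = ((t + 1 : Nat) : Int) := by push_cast; ring
    rw [hcast]
    set rec' := (if PySem.List.pyGetD arr (m : Int) 0 > PySem.List.pyGetD arr (t : Int) 0 then
        PySem.List.pySetD rec (t : Int) (m : Int) else rec) with hrec'
    have hlen' : rec'.length = arr.length := by
      rw [hrec']; split <;> simp [PySem.List.pySetD_natCast, hlen]
    have hget' : ∀ j : Nat, j < arr.length →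
        rec'.getD j 0 = if j = t ∧ arr.getD m 0 > arr.getD j 0 then (m : Int) else rec.getD j 0 := by
      intro j hj
      rw [hrec']
      simp only [PySem.List.pyGetD_natCast, PySem.List.pySetD_natCast]
      split
      · rename_i hg
        by_cases hjt : j = t
        · subst hjt
          rw [if_pos ⟨rfl, hg⟩, List.getD_eq_getElem?_getD, List.getElem?_set_self (by omega)]
          simp
        · rw [if_neg (by tauto), List.getD_eq_getElem?_getD, List.getElem?_set_ne (by omega),
              ← List.getD_eq_getElem?_getD]
      · rename_i hg
        rw [if_neg (by rintro ⟨rfl, h2⟩; exact hg h2)]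
    obtain ⟨hl2, hg2⟩ := ih (t + 1) (by omega) rec' (by omega) hlen'
    refine ⟨hl2, ?_⟩
    intro j hj
    rw [hg2 j hj, hget' j hj]
    split_ifs <;> first | rfl | omega

theorem outer1_spec (arr : List Int) :
    ∀ (a : Nat) (rec : List Int), rec.length = arr.length →
    (∀ j : Nat, j < arr.length → rec.getD j 0 = LL arr j a) →
    let res := (PySem.List.pyRange (a : Int) (arr.length : Int) 1).foldl (fun rec m =>
      (PySem.List.pyRange m (arr.length : Int) 1).foldl (fun rec n =>
        if PySem.List.pyGetD arr m 0 > PySem.List.pyGetD arr n 0 then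
          PySem.List.pySetD rec n m
        else rec) rec) rec
    res.length = arr.length ∧
    ∀ j : Nat, j < arr.length → res.getD j 0 = LL arr j arr.length := by
  intro a
  induction' hfuel : arr.length - a with fuel ih generalizing a
  · intro rec hlen hinv
    have ha : arr.length ≤ a := by omega
    have ha' : (arr.length : Int) ≤ (a : Int) := by exact_mod_cast ha
    rw [PySem.List.pyRange_one_eq_nil ha']
    refine ⟨hlen, ?_⟩
    intro j hj
    simp only [List.foldl_nil]
    rw [hinv j hj]
    -- LL arr j a = LL arr j arr.length since both ≥ j+1
    have h1 : LL arr j a = LL arr j (j + 1) := LL_stable arr j a (by omega)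
    have h2 : LL arr j arr.length = LL arr j (j + 1) := LL_stable arr j arr.length (by omega)
    rw [h1, h2]
  · intro rec hlen hinv
    have halt : (a : Int) < (arr.length : Int) := by exact_mod_cast (by omega : a < arr.length)
    rw [PySem.List.pyRange_one_cons halt, List.foldl_cons]
    obtain ⟨hl1, hg1⟩ := inner1_spec arr a a rec (le_refl a) hlen
    have hcast : ((a : Int) + 1) = ((a + 1 : Nat) : Int) := by push_cast; ring
    rw [hcast]
    refine ih (a + 1) (by omega) _ hl1 ?_
    intro j hj
    rw [hg1 j hj, hinv j hj]
    rw [show LL arr j (a + 1) =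
        (if a ≤ j ∧ arr.getD a 0 > arr.getD j 0 then (a : Int) else LL arr j a) from rfl]

-- ---- loop 2 ----

theorem inner2_spec (arr : List Int) (K : Nat) (hK : K < arr.length) :
    ∀ (t : Int) (rec : List Int), t ≤ (K : Int) → rec.length = arr.length →
    let res := (PySem.List.pyRange t (-1) (-1)).foldl (fun rec j =>
      if PySem.List.pyGetD arr (K : Int) 0 > PySem.List.pyGetD arr j 0 then
        if PySem.List.pyGetD rec j 0 = -1 then PySem.List.pySetD rec j (K : Int)
        else if (PySem.List.pyGetD rec j 0 - j).natAbs > ((K : Int) - j).natAbs then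
          PySem.List.pySetD rec j (K : Int)
        else rec
      else rec) rec
    res.length = arr.length ∧
    ∀ j : Nat, j < arr.length →
      res.getD j 0 = if (j : Int) ≤ t ∧ arr.getD K 0 > arr.getD j 0 then upd (rec.getD j 0) j K
        else rec.getD j 0 := by
  intro t
  induction' hfuel : (t + 1).toNat with fuel ih generalizing t
  · intro rec _ hlen
    have ht : t ≤ -1 := by omega
    rw [PySem.List.pyRange_neg_one_eq_nil ht]
    refine ⟨hlen, ?_⟩
    intro j hj
    rw [if_neg (by omega)]
    rfl
  · intro rec htK hlen
    have ht0 : 0 ≤ t := by omega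
    have htlt : (-1 : Int) < t := by omega
    rw [PySem.List.pyRange_neg_one_cons htlt, List.foldl_cons]
    obtain ⟨tn, rfl⟩ : ∃ tn : Nat, t = (tn : Int) := ⟨t.toNat, by omega⟩
    have htn : tn < arr.length := by
      have : (tn : Int) ≤ (K : Int) := htK
      omega
    set rec' := (if PySem.List.pyGetD arr (K : Int) 0 > PySem.List.pyGetD arr (tn : Int) 0 then
        if PySem.List.pyGetD rec (tn : Int) 0 = -1 then PySem.List.pySetD rec (tn : Int) (K : Int)
        else if (PySem.List.pyGetD rec (tn : Int) 0 - (tn : Int)).natAbs > ((K : Int) - (tn : Int)).natAbs then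
          PySem.List.pySetD rec (tn : Int) (K : Int)
        else rec
      else rec) with hrec'
    have hlen' : rec'.length = arr.length := by
      rw [hrec']; split_ifs <;> simp [PySem.List.pySetD_natCast, hlen]
    have hget' : ∀ j : Nat, j < arr.length →
        rec'.getD j 0 = if j = tn ∧ arr.getD K 0 > arr.getD j 0 then upd (rec.getD j 0) j K
          else rec.getD j 0 := by
      intro j hj
      rw [hrec']
      simp only [PySem.List.pyGetD_natCast, PySem.List.pySetD_natCast, upd]
      by_cases hjt : j = tn
      · subst hjt
        split_ifs <;>
          first
            | rfl
            | tauto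
            | (rw [List.getD_eq_getElem?_getD,
                List.getElem?_set_self (show j < rec.length by omega), Option.getD_some])
      · have hset : ∀ v : Int, (rec.set tn v).getD j 0 = rec.getD j 0 := by
          intro v
          rw [List.getD_eq_getElem?_getD, List.getElem?_set_ne (by omega : tn ≠ j),
            ← List.getD_eq_getElem?_getD]
        rw [if_neg (show ¬(j = tn ∧ arr.getD K 0 > arr.getD j 0) from fun hh => hjt hh.1)]
        split_ifs <;> first | rfl | exact hset _
    obtain ⟨hl2, hg2⟩ := ih ((tn : Int) - 1) (by omega) rec' (by omega) hlen'
    refine ⟨hl2, ?_⟩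
    intro j hj
    rw [hg2 j hj, hget' j hj]
    split_ifs <;> first | rfl | omega

theorem outer2_spec (arr : List Int) :
    ∀ (K : Int) (rec : List Int), K < (arr.length : Int) → -1 ≤ K →
    rec.length = arr.length →
    (∀ j : Nat, j < arr.length → rec.getD j 0 = G arr j (K + 1).toNat) →
    let res := (PySem.List.pyRange K (-1) (-1)).foldl (fun rec k =>
      (PySem.List.pyRange k (-1) (-1)).foldl (fun rec j =>
        if PySem.List.pyGetD arr k 0 > PySem.List.pyGetD arr j 0 then
          if PySem.List.pyGetD rec j 0 = -1 then PySem.List.pySetD rec j k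
          else if (PySem.List.pyGetD rec j 0 - j).natAbs > (k - j).natAbs then
            PySem.List.pySetD rec j k
          else rec
        else rec) rec) rec
    res.length = arr.length ∧
    ∀ j : Nat, j < arr.length → res.getD j 0 = G arr j 0 := by
  intro K
  induction' hfuel : (K + 1).toNat with fuel ih generalizing K
  · intro rec _ _ hlen hinv
    have hK : K ≤ -1 := by omega
    rw [PySem.List.pyRange_neg_one_eq_nil hK]
    refine ⟨hlen, ?_⟩
    intro j hj
    simp only [List.foldl_nil]
    rw [hinv j hj]
  · intro rec hKlt hKge hlen hinv
    have hK0 : 0 ≤ K := by omega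
    obtain ⟨Kn, rfl⟩ : ∃ Kn : Nat, K = (Kn : Int) := ⟨K.toNat, by omega⟩
    have hKn : Kn < arr.length := by omega
    rw [PySem.List.pyRange_neg_one_cons (by omega : (-1 : Int) < (Kn : Int)), List.foldl_cons]
    obtain ⟨hl1, hg1⟩ := inner2_spec arr Kn hKn (Kn : Int) rec (le_refl _) hlen
    refine ih ((Kn : Int) - 1) (by omega) _ (by omega) (by omega) hl1 ?_
    intro j hj
    have hfK : fuel = Kn := by omega
    subst hfK
    rw [hg1 j hj, hinv j hj]
    simp only [Nat.cast_le]
    rw [show G arr j fuel = (if j ≤ fuel ∧ arr.getD fuel 0 > arr.getD j 0 then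
        upd (G arr j (fuel + 1)) j fuel else G arr j (fuel + 1)) from by rw [G, if_pos hKn]]

-- the whole table computed by A (loop 1 then loop 2)
def tableA (arr : List Int) : List Int :=
  let length : Int := arr.length
  let record : List Int := (PySem.List.pyRange 0 length 1).map (fun _ => (-1 : Int))
  let record := (PySem.List.pyRange 0 length 1).foldl (fun rec m =>
    (PySem.List.pyRange m length 1).foldl (fun rec n =>
      if PySem.List.pyGetD arr m 0 > PySem.List.pyGetD arr n 0 then
        PySem.List.pySetD rec n m
      else rec) rec) record
  (PySem.List.pyRange (length - 1) (-1) (-1)).foldl (fun rec k =>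
    (PySem.List.pyRange k (-1) (-1)).foldl (fun rec j =>
      if PySem.List.pyGetD arr k 0 > PySem.List.pyGetD arr j 0 then
        if PySem.List.pyGetD rec j 0 = -1 then PySem.List.pySetD rec j k
        else if (PySem.List.pyGetD rec j 0 - j).natAbs > (k - j).natAbs then
          PySem.List.pySetD rec j k
        else rec
      else rec) rec) record

theorem nearest_larger_eq_table (arr : List Int) (i : Int) :
    nearest_larger arr i = PySem.List.pyGetD (tableA arr) i 0 := rfl

theorem tableA_spec (arr : List Int) :
    (tableA arr).length = arr.length ∧
    ∀ j : Nat, j < arr.length → (tableA arr).getD j 0 = G arr j 0 := by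
  have hlen : ((arr.length : Int) : Int) = (arr.length : Int) := rfl
  set length : Int := (arr.length : Int) with hlength
  set record : List Int := (PySem.List.pyRange 0 length 1).map (fun _ => (-1 : Int)) with hrecord
  have hrl : record.length = arr.length := by
    simp [hrecord, PySem.List.length_pyRange_one, hlength]
  have hr0 : ∀ j : Nat, j < arr.length → record.getD j 0 = LL arr j 0 := by
    intro j hj
    show record.getD j 0 = -1
    simp only [hrecord, List.getD_eq_getElem?_getD, List.getElem?_map]
    rw [PySem.List.getElem?_pyRange_one]
    rw [if_pos (show j < (length - 0).toNat by rw [hlength]; omega)]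
    rfl
  obtain ⟨hl1, hg1⟩ := by
    have := outer1_spec arr 0 record hrl hr0
    rwa [show ((0 : Nat) : Int) = (0 : Int) from rfl] at this
  have hinv1 : ∀ j : Nat, j < arr.length →
      ((PySem.List.pyRange (0 : Int) length 1).foldl (fun rec m =>
        (PySem.List.pyRange m length 1).foldl (fun rec n =>
          if PySem.List.pyGetD arr m 0 > PySem.List.pyGetD arr n 0 then
            PySem.List.pySetD rec n m
          else rec) rec) record).getD j 0 = G arr j (length - 1 + 1).toNat := by
    intro j hj
    rw [hg1 j hj]
    rw [show (length - 1 + 1).toNat = arr.length by rw [hlength]; omega]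
    rw [show G arr j arr.length = LL arr j arr.length from by rw [G, if_neg (lt_irrefl _)]]
  obtain ⟨hl2, hg2⟩ := outer2_spec arr (length - 1) _
    (by rw [hlength]; omega) (by rw [hlength]; omega) hl1 hinv1
  exact ⟨hl2, hg2⟩

-- ===== VERDICT (by name: the statement is the Claim_ definition above) =====
theorem nearest_larger_spec : Claim_equal_nearest_larger := by
  intro arr i _ hpre
  unfold Spec_nearest_larger
  have hP : -(arr.length : Int) ≤ i ∧ i < (arr.length : Int) := by
    have := hpre
    unfold Pre_nearest_larger PySem.Raise.InRange at this
    omega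
  have hidx0 : 0 ≤ (if 0 ≤ i then i else i + (arr.length : Int)) := by split <;> omega
  obtain ⟨j, hj⟩ : ∃ j : Nat, (if 0 ≤ i then i else i + (arr.length : Int)) = (j : Int) :=
    ⟨_, (Int.toNat_of_nonneg hidx0).symm⟩
  have hjlt : j < arr.length := by
    have : (if 0 ≤ i then i else i + (arr.length : Int)) < (arr.length : Int) := by
      split <;> omega
    omega
  obtain ⟨hl, hg⟩ := tableA_spec arr
  -- A's result equals table cell j
  have hA : nearest_larger arr i = G arr j 0 := by
    rw [nearest_larger_eq_table, ← hg j hjlt]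
    by_cases h0 : 0 ≤ i
    · rw [PySem.List.pyGetD_eq_getElem _ _ h0 (by rw [hl]; exact_mod_cast hP.2)]
      rw [List.getD_eq_getElem?_getD, List.getElem?_eq_getElem (by omega)]
      have hji : j = i.toNat := by
        have := hj
        rw [if_pos h0] at this
        omega
      subst hji
      rfl
    · have hk1 : 0 < (-i).toNat := by omega
      have hk2 : (-i).toNat ≤ (tableA arr).length := by rw [hl]; omega
      rw [show i = -(((-i).toNat : Nat) : Int) by omega]
      rw [PySem.List.pyGetD_neg_natCast _ _ _ hk1 hk2]
      rw [List.getD_eq_getElem?_getD, List.getElem?_eq_getElem (by omega)]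
      have hji : (tableA arr).length - (-i).toNat = j := by
        have := hj
        rw [if_neg (by omega)] at this
        omega
      subst hji
      rfl
  rw [hA]
  -- B's result
  simp only [nearest_larger_alt]
  rw [hj]
  simp only [Int.toNat_natCast, PySem.List.pyGetD_natCast]
  rw [G_eq_combine arr j 0]
  rw [show LL arr j arr.length = findLeftB arr (arr.getD j 0) j from by
    rw [LL_stable arr j arr.length (by omega),
      show LL arr j (j + 1) = LL arr j j from by
        rw [show LL arr j (j + 1) =
            (if j ≤ j ∧ arr.getD j 0 > arr.getD j 0 then (j : Int) else LL arr j j) from rfl,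
          if_neg (fun h => lt_irrefl _ h.2)],
      LL_eq_findLeftB arr j j (le_refl _)]]
  rw [FR_low arr j 0 (Nat.zero_le _), FR_eq_findRightB arr j (j + 1) (Nat.lt_succ_self _)]
  simp only [combine]
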